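-- pv_equiv track=rewrite | github.com/dreeseh/holbertonschool-higher_level_programming | 0x03-python-data_structures/10-divisible_by_2.py | divisible_by_2
-- ===== SOURCE A (Python) =====
-- def divisible_by_2(my_list=[]):
--     reeses_list = my_list.copy()
--     for i in range(len(my_list)):
--         if i % 2 == 0:
--             reeses_list[i] = True
--         else:
--             reeses_list[i] = False
--     return reeses_list
-- ===== SOURCE B (Python) =====
-- def divisible_by_2(my_list=[]):
--     n = len(my_list)
--     return ([True, False] * ((n + 1) // 2))[:n]
-- ===== Notes on version B (the rewrite author's own statement) =====
-- stated objective: simpler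
-- what changed: Replaces the per-index loop with if/else writes into a copy by tiling the [True, False] pattern (n+1)//2 times and truncating to length n in one expression; list repetition and slicing run in C, removing the Python-level loop.
import Mathlib
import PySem

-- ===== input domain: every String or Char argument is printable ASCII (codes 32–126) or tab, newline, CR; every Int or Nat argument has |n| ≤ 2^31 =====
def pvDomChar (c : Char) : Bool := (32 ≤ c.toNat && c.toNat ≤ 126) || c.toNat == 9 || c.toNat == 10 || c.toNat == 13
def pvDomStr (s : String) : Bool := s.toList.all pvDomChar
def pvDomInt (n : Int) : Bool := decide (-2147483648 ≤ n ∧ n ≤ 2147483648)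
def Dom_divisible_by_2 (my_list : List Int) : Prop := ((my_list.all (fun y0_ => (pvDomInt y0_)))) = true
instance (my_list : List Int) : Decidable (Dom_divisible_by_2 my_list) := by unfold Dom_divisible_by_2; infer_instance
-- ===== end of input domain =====

-- B replaces A's per-index loop with if/else by tiling [True, False] and truncating: simpler, same O(n).

-- ===== PORT A =====
-- A writes into position i of a copy at each step; each position is written exactly once,
-- in index order, so the loop is ported as a left fold over range(len) appending the value
-- written at index i (the initial Int copy is fully overwritten and never read).
def divisible_by_2 (my_list : List Int) : List Bool :=
  (PySem.List.pyRange 0 my_list.length 1).foldl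
    (fun acc i => if i % 2 == 0 then acc ++ [true] else acc ++ [false]) []

-- ===== PORT B =====
-- ([True, False] * ((n+1)//2))[:n]
def divisible_by_2_alt (my_list : List Int) : List Bool :=
  ((List.replicate ((my_list.length + 1) / 2) [true, false]).flatten).take my_list.length

-- ===== PRECONDITION & SPEC =====
def Spec_divisible_by_2 (my_list : List Int) (out : List Bool) : Prop := out = divisible_by_2_alt my_list
instance (my_list : List Int) (out : List Bool) : Decidable (Spec_divisible_by_2 my_list out) := by unfold Spec_divisible_by_2; infer_instance

-- ===== CLAIM (what is proved, stated in full; the proofs are below) =====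
def Claim_equal_divisible_by_2 : Prop := ∀ (my_list : List Int), Dom_divisible_by_2 my_list → Spec_divisible_by_2 my_list (divisible_by_2 my_list)

-- ===== LEMMAS AND PROOFS =====

-- canonical alternating list of length n
def pvAlt : Nat → List Bool
  | 0 => []
  | n + 1 => pvAlt n ++ [decide (n % 2 = 0)]

theorem pvA_eq (n : Nat) :
    (PySem.List.pyRange 0 n 1).foldl
      (fun acc i => if i % 2 == 0 then acc ++ [true] else acc ++ [false]) [] = pvAlt n := by
  induction n with
  | zero => simp [pvAlt]
  | succ n ih =>
      have h : (PySem.List.pyRange 0 ((n : Int) + 1) 1)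
          = PySem.List.pyRange 0 (n : Int) 1 ++ [(n : Int)] := by
        exact PySem.List.pyRange_one_succ_right (by exact_mod_cast Nat.zero_le n)
      have hcast : ((n + 1 : Nat) : Int) = (n : Int) + 1 := by push_cast; ring
      rw [show ((n + 1 : Nat) : Int) = (n : Int) + 1 from hcast] at *
      rw [h, List.foldl_append, ih]
      by_cases hp : n % 2 = 0
      · have hb : ((n : Int) % 2 == 0) = true := by
          simp only [beq_iff_eq]; omega
        simp only [List.foldl_cons, List.foldl_nil, hb, if_true]
        simp [pvAlt, hp]
      · have hb : ((n : Int) % 2 == 0) = false := by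
          simp only [beq_eq_false_iff_ne, ne_eq]; omega
        simp only [List.foldl_cons, List.foldl_nil, hb, if_false, Bool.false_eq_true]
        simp [pvAlt, hp]

theorem pvAlt_length (n : Nat) : (pvAlt n).length = n := by
  induction n with
  | zero => rfl
  | succ n ih => simp [pvAlt, ih]

theorem pvFlatten_eq (k : Nat) :
    (List.replicate k [true, false]).flatten = pvAlt (2 * k) := by
  induction k with
  | zero => rfl
  | succ k ih =>
      have h1 : 2 * (k + 1) = (2 * k + 1) + 1 := by ring
      have he : (2 * k) % 2 = 0 := by omega
      rw [h1, List.replicate_succ']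
      simp only [List.flatten_append, List.flatten_cons, List.flatten_nil, List.append_nil, ih]
      simp [pvAlt, he, List.append_assoc]

theorem pvAlt_take (n m : Nat) (h : n ≤ m) : (pvAlt m).take n = pvAlt n := by
  induction m with
  | zero => simp at h; subst h; rfl
  | succ m ih =>
      rcases Nat.lt_or_ge n (m + 1) with hlt | hge
      · have hn : n ≤ m := by omega
        rw [pvAlt, List.take_append_of_le_length (by rw [pvAlt_length]; omega), ih hn]
      · have : n = m + 1 := by omega
        subst this
        rw [List.take_of_length_le (by rw [pvAlt_length])]

-- ===== VERDICT (by name: the statement is the Claim_ definition above) =====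
theorem divisible_by_2_spec : Claim_equal_divisible_by_2 := by
  intro my_list _
  unfold Spec_divisible_by_2 divisible_by_2 divisible_by_2_alt
  rw [pvA_eq, pvFlatten_eq, pvAlt_take]
  omega
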